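-- pv_equiv track=rewrite | github.com/andrew-christianson/Polyglot-Euler | Problem 67-0.py | look_forward_greedily
-- ===== SOURCE A (Python) =====
-- def path_score(path, tri_arr):
--     return sum([tri_arr[idx][chc] for idx, chc in enumerate(path)])
--
-- def greedy_forward(tri_arr, initial_row=0, initial_idx=0):
--     path = [initial_idx]
--     for idx, row in enumerate(tri_arr[initial_row:]):
--         prev_i = idx - 1
--         prev_p = path[prev_i]
--         if idx == 0:
--             continue
--         if prev_p >= len(row):
--             path.append(len(row) - 1)
--         else:
--             path.append(prev_p if row[prev_p] > row[prev_p + 1] else prev_p + 1)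
--     return path
--
-- def look_forward_greedily(tri_arr):
--     path = [0]
--     for idx, row in enumerate(tri_arr):
--         if idx == 0:
--             continue
--         prev_p = path[idx - 1]
--         c_1_gpath = greedy_forward(tri_arr, initial_row=idx, initial_idx=prev_p)
--         c_1_val = path_score(c_1_gpath, tri_arr[idx:])
--         c_2_gpath = greedy_forward(tri_arr, initial_row=idx, initial_idx=prev_p + 1)
--         c_2_val = path_score(c_2_gpath, tri_arr[idx:])
--         if c_1_val > c_2_val:
--             path.append(prev_p)
--         else:
--             path.append(prev_p + 1)
--     return path
-- ===== SOURCE B (Python) =====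
-- def look_forward_greedily(tri_arr):
--     # Bottom-up: g[r][i] = score of the greedy descent that starts at cell (r, i),
--     # precomputed once for rows 1..n-1 and only for the columns 0..r a descent from
--     # the apex can reach; the forward pass then just compares the two candidate
--     # cells' table scores per row.
--     n = len(tri_arr)
--     scores = []
--     g = []
--     for r in range(n - 1, 0, -1):
--         row = tri_arr[r]
--         if r == n - 1:
--             g = [row[i] for i in range(r + 1)]
--         else:
--             below = tri_arr[r + 1]
--             g = [row[i] + g[i if below[i] > below[i + 1] else i + 1]
--                  for i in range(r + 1)]
--         scores.append(g)
--     scores.reverse()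
--     path = [0]
--     for idx in range(1, n):
--         p = path[-1]
--         path.append(p if scores[idx - 1][p] > scores[idx - 1][p + 1] else p + 1)
--     return path
-- ===== Notes on version B (the rewrite author's own statement) =====
-- stated objective: faster
-- what changed: Replaces A's per-row restart of a full greedy descent plus a separate summation pass (greedy_forward + path_score for both children at every row) with one bottom-up table g[r][i] = score of the greedy descent starting at (r,i) over the reachable columns 0..r, computed once, so the forward pass just compares two table cells per row.
-- outside the precondition, e.g. on look_forward_greedily([[1, -2, 1], [-2, 5], [4, 0, -3], [4, -3, -3]]): A returns [0, 0, 0, 0], B raises IndexError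
import Mathlib
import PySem

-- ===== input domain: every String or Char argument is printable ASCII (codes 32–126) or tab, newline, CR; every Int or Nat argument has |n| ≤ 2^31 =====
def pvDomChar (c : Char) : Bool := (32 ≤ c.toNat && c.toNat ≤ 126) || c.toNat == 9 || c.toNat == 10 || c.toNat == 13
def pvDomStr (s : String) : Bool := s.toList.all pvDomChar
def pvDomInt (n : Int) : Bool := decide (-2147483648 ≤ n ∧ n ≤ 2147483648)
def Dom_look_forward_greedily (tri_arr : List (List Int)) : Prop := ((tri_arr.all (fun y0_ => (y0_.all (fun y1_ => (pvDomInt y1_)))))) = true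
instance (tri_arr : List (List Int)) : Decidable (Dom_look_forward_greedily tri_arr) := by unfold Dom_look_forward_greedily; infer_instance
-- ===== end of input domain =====

-- B replaces A's repeated greedy walks + per-walk rescoring with one bottom-up score table over the reachable cells and a single forward pass.


-- ===== PORT A =====
-- xs[i] with Python index semantics; only used where Pre_ guarantees the index is in range
def pyIdx (xs : List Int) (i : Int) : Int := (PySem.List.pyGet? xs i).getD 0
def pyRow (xss : List (List Int)) (i : Int) : List Int := (PySem.List.pyGet? xss i).getD []

def path_score (path : List Int) (tri_arr : List (List Int)) : Int :=
  ((PySem.List.enumerate path).map (fun p => pyIdx (pyRow tri_arr p.1) p.2)).sum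

def gfLoop : List (List Int) → Nat → List Int → List Int
  | [], _, path => path
  | row :: rest, idx, path =>
    if idx = 0 then gfLoop rest (idx + 1) path
    else
      let prev_p := pyIdx path ((idx : Int) - 1)
      gfLoop rest (idx + 1)
        (if (row.length : Int) ≤ prev_p then path ++ [(row.length : Int) - 1]
         else path ++ [if pyIdx row prev_p > pyIdx row (prev_p + 1) then prev_p else prev_p + 1])

def greedy_forward (tri_arr : List (List Int)) (initial_row : Int) (initial_idx : Int) : List Int :=
  gfLoop (PySem.List.slice tri_arr (some initial_row) none) 0 [initial_idx]

def lfLoop (tri_arr : List (List Int)) : List (List Int) → Nat → List Int → List Int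
  | [], _, path => path
  | _row :: rest, idx, path =>
    if idx = 0 then lfLoop tri_arr rest (idx + 1) path
    else
      let prev_p := pyIdx path ((idx : Int) - 1)
      let c_1_val := path_score (greedy_forward tri_arr (idx : Int) prev_p) (PySem.List.slice tri_arr (some (idx : Int)) none)
      let c_2_val := path_score (greedy_forward tri_arr (idx : Int) (prev_p + 1)) (PySem.List.slice tri_arr (some (idx : Int)) none)
      lfLoop tri_arr rest (idx + 1) (path ++ [if c_1_val > c_2_val then prev_p else prev_p + 1])

def look_forward_greedily (tri_arr : List (List Int)) : List Int := lfLoop tri_arr tri_arr 0 [0]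

-- ===== PORT B =====
def altChild (below : List Int) (i : Nat) : Nat :=
  if pyIdx below (i : Int) > pyIdx below ((i : Int) + 1) then i else i + 1

-- bottom-up score table for the rows tri[r0:], built from the last row upwards;
-- row r0+m of the table carries the reachable columns 0..r0+m
def altScores : List (List Int) → Nat → List (List Int)
  | [], _ => []
  | [row], r => [(List.range (r + 1)).map (fun (i : Nat) => pyIdx row (i : Int))]
  | row :: below :: rest, r =>
    let gs := altScores (below :: rest) (r + 1)
    ((List.range (r + 1)).map
      (fun (i : Nat) => pyIdx row (i : Int) + pyIdx (gs.headD []) ((altChild below i : Nat) : Int))) :: gs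

def look_forward_greedily_alt (tri_arr : List (List Int)) : List Int :=
  let scores := altScores tri_arr.tail 1
  (PySem.List.pyRange 1 (tri_arr.length : Int) 1).foldl
    (fun path idx =>
      let p := pyIdx path (-1)
      path ++ [if pyIdx (pyRow scores (idx - 1)) p > pyIdx (pyRow scores (idx - 1)) (p + 1) then p else p + 1])
    [0]

-- ===== PRECONDITION & SPEC =====
-- Pre_ keeps the function's natural domain, triangles wide enough for a descent from the apex
-- (row r has more than r cells for every r ≥ 1; row 0 is never descended into): on narrower,
-- ragged arrays A almost always raises IndexError, and in the rare cases where the greedy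
-- choices happen to dodge every out-of-range cell and A returns, that value is an accident of
-- its on-demand walks that a precomputed table never reaches (B raises there).
def Pre_look_forward_greedily (tri_arr : List (List Int)) : Prop :=
  ∀ r ∈ List.range tri_arr.length, 1 ≤ r → r < (tri_arr.getD r []).length
instance (tri_arr : List (List Int)) : Decidable (Pre_look_forward_greedily tri_arr) := by
  unfold Pre_look_forward_greedily; infer_instance

def pvWitness_look_forward_greedily : List (List Int) := [[3], [7, 4], [2, 4, 6]]

def Spec_look_forward_greedily (tri_arr : List (List Int)) (out : List Int) : Prop := out = look_forward_greedily_alt tri_arr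
instance (tri_arr : List (List Int)) (out : List Int) : Decidable (Spec_look_forward_greedily tri_arr out) := by unfold Spec_look_forward_greedily; infer_instance

-- ===== CLAIM (what is proved, stated in full; the proofs are below) =====
def Claim_equal_look_forward_greedily : Prop := ∀ (tri_arr : List (List Int)), Dom_look_forward_greedily tri_arr → Pre_look_forward_greedily tri_arr → Spec_look_forward_greedily tri_arr (look_forward_greedily tri_arr)

-- ===== LEMMAS AND PROOFS =====

-- the greedy child choice on Int indices (A's comparison), and the score of a full greedy descent
def child (below : List Int) (j : Int) : Int :=
  if pyIdx below j > pyIdx below (j + 1) then j else j + 1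

def W : List (List Int) → Int → Int
  | [], _ => 0
  | [row], j => pyIdx row j
  | row :: below :: rest, j => pyIdx row j + W (below :: rest) (child below j)

-- the index trace of the greedy descent below the start cell
def chainL : List (List Int) → Nat → List Int
  | [], _ => []
  | row :: rest, j => ((altChild row j : Nat) : Int) :: chainL rest (altChild row j)

theorem altChild_cast (below : List Int) (j : Nat) :
    ((altChild below j : Nat) : Int) = child below (j : Int) := by
  unfold altChild child
  split_ifs <;> push_cast <;> ring_nf

theorem altChild_le (below : List Int) (j : Nat) : altChild below j ≤ j + 1 := by
  unfold altChild
  split_ifs <;> omega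

theorem ps_shift (p : List Int) (row : List Int) (rest : List (List Int)) : ∀ (s : Nat),
    ((PySem.List.enumerate p ((s : Int) + 1)).map (fun q => pyIdx (pyRow (row :: rest) q.1) q.2)).sum
    = ((PySem.List.enumerate p (s : Int)).map (fun q => pyIdx (pyRow rest q.1) q.2)).sum := by
  induction p with
  | nil => intro s; simp [PySem.List.enumerate_nil]
  | cons x xs ih =>
    intro s
    rw [PySem.List.enumerate_cons, PySem.List.enumerate_cons]
    have h1 : ((s : Int) + 1) + 1 = ((s + 1 : Nat) : Int) + 1 := by push_cast; ring
    have h2 : (s : Int) + 1 = ((s + 1 : Nat) : Int) := by push_cast; ring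
    simp only [List.map_cons, List.sum_cons, h2, ih (s + 1)]
    congr 1
    show pyIdx (pyRow (row :: rest) (((s + 1 : Nat) : Int))) x = pyIdx (pyRow rest (s : Int)) x
    have : pyRow (row :: rest) ((s + 1 : Nat) : Int) = pyRow rest (s : Int) := by
      unfold pyRow
      have : ((s + 1 : Nat) : Int) = (s : Int) + 1 := by push_cast; ring
      rw [this, PySem.List.pyGet?_cons_succ]
    rw [this]

theorem path_score_cons (a : Int) (p : List Int) (row : List Int) (rest : List (List Int)) :
    path_score (a :: p) (row :: rest) = pyIdx row a + path_score p rest := by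
  unfold path_score
  rw [PySem.List.enumerate_cons]
  simp only [List.map_cons, List.sum_cons]
  have h0 : (0 : Int) + 1 = ((0 : Nat) : Int) + 1 := by norm_num
  rw [h0, ps_shift p row rest 0]
  congr 1
  · show pyIdx (pyRow (row :: rest) 0) a = pyIdx row a
    unfold pyRow
    rw [PySem.List.pyGet?_zero_cons]
    rfl

theorem score_chain (rows : List (List Int)) : ∀ (row : List Int) (j : Nat),
    path_score (((j : Nat) : Int) :: chainL rows j) (row :: rows) = W (row :: rows) (j : Int) := by
  induction rows with
  | nil =>
    intro row j
    rw [chainL, path_score_cons]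
    show pyIdx row (j : Int) + path_score [] [] = W [row] (j : Int)
    have : path_score [] [] = 0 := by unfold path_score; simp [PySem.List.enumerate_nil]
    rw [this]; unfold W; ring
  | cons next rest ih =>
    intro row j
    rw [chainL, path_score_cons, ih next (altChild next j), altChild_cast]
    rfl

theorem gf_loop_eq (rows : List (List Int)) : ∀ (idx : Nat) (path : List Int) (j : Nat),
    1 ≤ idx → path.length = idx → path.getLast? = some ((j : Nat) : Int) →
    (∀ m (hm : m < rows.length), j + m + 1 < rows[m].length) →
    gfLoop rows idx path = path ++ chainL rows j := by
  induction rows with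
  | nil => intro idx path j _ _ _ _; simp [gfLoop, chainL]
  | cons row rest ih =>
    intro idx path j h1 hlen hlast hbound
    have hidx0 : ¬ idx = 0 := by omega
    rw [gfLoop]
    simp only [hidx0, if_false]
    have hjlt : j + 1 < row.length := by
      have := hbound 0 (by simp)
      simpa using this
    have hprev : pyIdx path ((idx : Int) - 1) = ((j : Nat) : Int) := by
      have hcast : (idx : Int) - 1 = ((idx - 1 : Nat) : Int) := by omega
      unfold pyIdx
      rw [hcast, PySem.List.pyGet?_natCast]
      have : path[idx - 1]? = path.getLast? := by
        rw [List.getLast?_eq_getElem?, hlen]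
      rw [this, hlast]; rfl
    rw [hprev]
    have hguard : ¬ ((row.length : Int) ≤ ((j : Nat) : Int)) := by omega
    simp only [hguard, if_false]
    have helem : (if pyIdx row ((j : Nat) : Int) > pyIdx row (((j : Nat) : Int) + 1)
        then ((j : Nat) : Int) else ((j : Nat) : Int) + 1) = ((altChild row j : Nat) : Int) := by
      rw [altChild_cast]; unfold child; rfl
    rw [helem]
    rw [ih (idx + 1) (path ++ [((altChild row j : Nat) : Int)]) (altChild row j) (by omega)
        (by simp [hlen]) (by simp)
        (by intro m hm
            have hb := hbound (m + 1) (by simpa using Nat.succ_lt_succ hm)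
            have hle := altChild_le row j
            simp only [List.getElem_cons_succ] at hb
            omega)]
    rw [chainL]
    simp

theorem greedy_score (tri : List (List Int)) (r j : Nat)
    (hr : r < tri.length)
    (hbound : ∀ m (hm : m < (tri.drop (r + 1)).length), j + m + 1 < (tri.drop (r + 1))[m].length) :
    path_score (greedy_forward tri ((r : Nat) : Int) ((j : Nat) : Int))
        (PySem.List.slice tri (some ((r : Nat) : Int)) none)
      = W (tri.drop r) ((j : Nat) : Int) := by
  have hslice : PySem.List.slice tri (some ((r : Nat) : Int)) none = tri.drop r :=
    PySem.List.slice_from_natCast tri r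
  have hdrop : tri.drop r = tri[r] :: tri.drop (r + 1) := List.drop_eq_getElem_cons hr
  unfold greedy_forward
  rw [hslice, hdrop, gfLoop]
  simp only [reduceIte]
  rw [gf_loop_eq (tri.drop (r + 1)) 1 [((j : Nat) : Int)] j (le_refl 1) rfl rfl hbound]
  show path_score (((j : Nat) : Int) :: chainL (tri.drop (r + 1)) j) (tri[r] :: tri.drop (r + 1)) = _
  exact score_chain (tri.drop (r + 1)) tri[r] j

theorem altScores_ne_nil (t : List (List Int)) (r : Nat) (h : t ≠ []) : altScores t r ≠ [] := by
  match t, h with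
  | [row], _ => simp [altScores]
  | row :: below :: rest, _ => simp [altScores]

theorem altScores_get (t : List (List Int)) (r0 : Nat) :
    (∀ m (hm : m < t.length), r0 + m < t[m].length) →
    ∀ (m i : Nat), m < t.length → i ≤ r0 + m →
    pyIdx (pyRow (altScores t r0) ((m : Nat) : Int)) ((i : Nat) : Int) = W (t.drop m) ((i : Nat) : Int) := by
  induction t, r0 using altScores.induct with
  | case1 r0 => intro _ m i hm _; simp at hm
  | case2 row r0 =>
    intro hlen m i hm hi
    match m with
    | 0 =>
      simp only [altScores]
      unfold pyRow
      rw [PySem.List.pyGet?_natCast]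
      show pyIdx (((([(List.range (r0 + 1)).map (fun (k : Nat) => pyIdx row (k : Int))] : List (List Int)))[(0 : Nat)]?).getD []) (i : Int) = W ([row].drop 0) (i : Int)
      simp only [List.getElem?_cons_zero, Option.getD_some, List.drop_zero]
      unfold pyIdx
      rw [PySem.List.pyGet?_natCast, List.getElem?_map, List.getElem?_range (by omega : i < r0 + 1)]
      simp only [Option.map_some, Option.getD_some]
      rfl
  | case3 row below rest r0 ih =>
    intro hlen m i hm hi
    have hgs := altScores_ne_nil (below :: rest) (r0 + 1) (by simp)
    have hlentail : ∀ m (hm : m < (below :: rest).length), (r0 + 1) + m < (below :: rest)[m].length := by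
      intro m hm
      have := hlen (m + 1) (by simpa using Nat.succ_lt_succ hm)
      simp only [List.getElem_cons_succ] at this
      omega
    match m with
    | 0 =>
      simp only [altScores]
      unfold pyRow
      rw [PySem.List.pyGet?_natCast]
      show pyIdx (((((List.range (r0 + 1)).map
          (fun (k : Nat) => pyIdx row (k : Int) + pyIdx ((altScores (below :: rest) (r0 + 1)).headD []) ((altChild below k : Nat) : Int))
          :: altScores (below :: rest) (r0 + 1)) : List (List Int))[(0 : Nat)]?).getD []) (i : Int)
        = W ((row :: below :: rest).drop 0) (i : Int)
      simp only [List.getElem?_cons_zero, Option.getD_some]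
      unfold pyIdx
      rw [PySem.List.pyGet?_natCast, List.getElem?_map, List.getElem?_range (by omega : i < r0 + 1)]
      simp only [Option.map_some, Option.getD_some]
      set i' := altChild below i with hi'
      have hi'le : i' ≤ r0 + 1 := by
        have := altChild_le below i
        omega
      have hhd : (altScores (below :: rest) (r0 + 1)).headD []
          = pyRow (altScores (below :: rest) (r0 + 1)) ((0 : Nat) : Int) := by
        unfold pyRow
        rw [PySem.List.pyGet?_natCast]
        match h : altScores (below :: rest) (r0 + 1), hgs with
        | g0 :: gs', _ => simp
      have hscore : pyIdx ((altScores (below :: rest) (r0 + 1)).headD []) ((i' : Nat) : Int)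
          = W (below :: rest) ((i' : Nat) : Int) := by
        rw [hhd]
        simpa using ih hlentail 0 i' (by simp) (by omega)
      show pyIdx row ((i : Nat) : Int)
          + pyIdx ((altScores (below :: rest) (r0 + 1)).headD []) ((i' : Nat) : Int)
          = W ((row :: below :: rest).drop 0) ((i : Nat) : Int)
      rw [hscore, hi', altChild_cast]
      simp only [List.drop_zero]
      rfl
    | m' + 1 =>
      simp only [altScores]
      have hcast : ((m' + 1 : Nat) : Int) = ((m' : Nat) : Int) + 1 := by push_cast; ring
      unfold pyRow
      rw [hcast, PySem.List.pyGet?_cons_succ]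
      have := ih hlentail m' i (by simpa using Nat.lt_of_succ_lt_succ hm) (by omega)
      unfold pyRow at this
      simpa using this

theorem pyIdx_last (path : List Int) (idx : Nat) (v : Int)
    (h1 : 1 ≤ idx) (hlen : path.length = idx) (hlast : path.getLast? = some v) :
    pyIdx path ((idx : Int) - 1) = v := by
  have hcast : (idx : Int) - 1 = ((idx - 1 : Nat) : Int) := by omega
  unfold pyIdx
  rw [hcast, PySem.List.pyGet?_natCast]
  have : path[idx - 1]? = path.getLast? := by
    rw [List.getLast?_eq_getElem?, hlen]
  rw [this, hlast]
  rfl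

theorem pre_getElem {tri : List (List Int)} (hpre : Pre_look_forward_greedily tri)
    {r : Nat} (h1 : 1 ≤ r) (hr : r < tri.length) : r < tri[r].length := by
  have := hpre r (List.mem_range.mpr hr) h1
  rwa [List.getD_eq_getElem tri [] hr] at this

theorem main_loop (tri : List (List Int)) (hpre : Pre_look_forward_greedily tri) :
    ∀ (rows : List (List Int)) (idx : Nat) (path : List Int) (j : Nat),
    rows = tri.drop idx → 1 ≤ idx → path.length = idx →
    path.getLast? = some ((j : Nat) : Int) → j < idx →
    lfLoop tri rows idx path
      = (PySem.List.pyRange ((idx : Nat) : Int) ((tri.length : Nat) : Int) 1).foldl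
          (fun path i =>
            let p := pyIdx path (-1)
            path ++ [if pyIdx (pyRow (altScores tri.tail 1) (i - 1)) p > pyIdx (pyRow (altScores tri.tail 1) (i - 1)) (p + 1)
                     then p else p + 1]) path := by
  intro rows
  induction rows generalizing tri with
  | nil =>
    intro idx path j hrows _ _ _ _
    have hge : tri.length ≤ idx := by
      have := congrArg List.length hrows
      simp [List.length_drop] at this
      omega
    have hnil : PySem.List.pyRange ((idx : Nat) : Int) ((tri.length : Nat) : Int) 1 = [] := by
      simp [PySem.List.pyRange]
      omega
    rw [hnil, lfLoop]
    rfl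
  | cons row rest ih =>
    intro idx path j hrows h1 hlen hlast hjlt
    have hidxlt : idx < tri.length := by
      have := congrArg List.length hrows
      simp [List.length_drop] at this
      omega
    have hrest : tri.drop (idx + 1) = rest := by
      rw [← List.tail_drop, ← hrows]
      rfl
    -- bounds for the greedy walks starting at row idx
    have hbound : ∀ (j0 : Nat), j0 ≤ idx → ∀ m (hm : m < (tri.drop (idx + 1)).length),
        j0 + m + 1 < (tri.drop (idx + 1))[m].length := by
      intro j0 hj0 m hm
      have hm' : idx + 1 + m < tri.length := by
        simp [List.length_drop] at hm
        omega
      have hgd : (tri.drop (idx + 1))[m] = tri[idx + 1 + m] := by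
        rw [List.getElem_drop]
      have := pre_getElem hpre (by omega : 1 ≤ idx + 1 + m) hm'
      rw [hgd]
      omega
    have hc1 := greedy_score tri idx j hidxlt (hbound j (by omega))
    have hc2' := greedy_score tri idx (j + 1) hidxlt (hbound (j + 1) (by omega))
    -- the precomputed table agrees with the walk scores at both candidate cells
    have htlen : idx - 1 < tri.tail.length := by
      simp [List.length_tail]
      omega
    have htb : ∀ m (hm : m < tri.tail.length), 1 + m < tri.tail[m].length := by
      intro m hm
      have hm' : m + 1 < tri.length := by
        simp [List.length_tail] at hm
        omega
      have hgd : tri.tail[m] = tri[m + 1] := by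
        rcases tri with _ | ⟨r0, tr⟩
        · simp at hm'
        · simp
      have := pre_getElem hpre (by omega : 1 ≤ m + 1) hm'
      rw [hgd]
      omega
    have hdt : tri.tail.drop (idx - 1) = tri.drop idx := by
      rw [List.drop_tail]
      congr 1
      omega
    have hs1' := altScores_get tri.tail 1 htb (idx - 1) j htlen (by omega)
    have hs2' := altScores_get tri.tail 1 htb (idx - 1) (j + 1) htlen (by omega)
    rw [hdt] at hs1' hs2'
    have hcastm : ((idx : Nat) : Int) - 1 = ((idx - 1 : Nat) : Int) := by omega
    have hs1 : pyIdx (pyRow (altScores tri.tail 1) (((idx : Nat) : Int) - 1)) ((j : Nat) : Int)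
        = W (tri.drop idx) ((j : Nat) : Int) := by rw [hcastm]; exact hs1'
    have hs2 : pyIdx (pyRow (altScores tri.tail 1) (((idx : Nat) : Int) - 1)) (((j + 1 : Nat) : Nat) : Int)
        = W (tri.drop idx) (((j + 1 : Nat) : Nat) : Int) := by rw [hcastm]; exact hs2'
    -- unfold one iteration on each side
    rw [lfLoop, if_neg (by omega : ¬ idx = 0)]
    have hrng : PySem.List.pyRange ((idx : Nat) : Int) ((tri.length : Nat) : Int) 1
        = ((idx : Nat) : Int) :: PySem.List.pyRange (((idx + 1 : Nat) : Nat) : Int) ((tri.length : Nat) : Int) 1 := by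
      rw [PySem.List.pyRange_one_cons (by exact_mod_cast hidxlt)]
      norm_num
    rw [hrng, List.foldl_cons]
    have hp : pyIdx path (-1) = ((j : Nat) : Int) := by
      unfold pyIdx
      rw [PySem.List.pyGet?_neg_one, hlast]
      rfl
    have hcast1 : ((j : Nat) : Int) + 1 = (((j + 1 : Nat) : Nat) : Int) := by push_cast; ring
    simp only [pyIdx_last path idx ((j : Nat) : Int) h1 hlen hlast, hp, hcast1, hc1, hc2', hs1, hs2]
    set j2 := if W (tri.drop idx) ((j : Nat) : Int) > W (tri.drop idx) (((j + 1 : Nat) : Nat) : Int)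
        then j else j + 1 with hj2
    have helem : (if W (tri.drop idx) ((j : Nat) : Int) > W (tri.drop idx) (((j + 1 : Nat) : Nat) : Int)
        then ((j : Nat) : Int) else (((j + 1 : Nat) : Nat) : Int)) = ((j2 : Nat) : Int) := by
      rw [hj2]
      split_ifs <;> rfl
    rw [helem]
    exact ih tri hpre (idx + 1) (path ++ [((j2 : Nat) : Int)]) j2 hrest.symm (by omega)
      (by simp [hlen]) (by simp)
      (by rw [hj2]; split_ifs <;> omega)

-- ===== VERDICT (by name: the statement is the Claim_ definition above) =====
theorem look_forward_greedily_spec : Claim_equal_look_forward_greedily := by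
  unfold Claim_equal_look_forward_greedily
  intro tri _ hpre
  unfold Spec_look_forward_greedily
  cases tri with
  | nil => decide
  | cons row rest =>
    unfold look_forward_greedily look_forward_greedily_alt
    rw [lfLoop, if_pos rfl]
    have := main_loop (row :: rest) hpre rest 1 [0] 0 (by simp) (le_refl 1) rfl
      (by norm_num) (by omega)
    simpa using this
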